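-- pv_equiv track=rewrite | github.com/joanalza/GECCO_2021 | Code/src/Algorithms/sHC.py | all_swap_combinations
-- ===== SOURCE A (Python) =====
-- def all_swap_combinations(s):
--     def combinations(iterable, r):
--         pool = tuple(iterable)
--         n = len(pool)
--         for indices in all_permutations(range(n), r):
--             if sorted(indices) == list(indices):
--                 yield tuple(pool[i] for i in indices)
--
--     def all_permutations(iterable, r = None):
--         pool = tuple(iterable)
--         n = len(pool)
--         r = n if r == None else r
--         if r > n:
--             return
--         indices = list(range(n))
--         cycles = list(range(n, n-r, -1))
--         yield tuple(pool[i] for i in indices[:r])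
--         while n:
--             for i in reversed(range(r)):
--                 cycles[i] -= 1
--                 if cycles[i] == 0:
--                     indices[i:] = indices[i+1:] + indices[i:i+1]
--                     cycles[i] = n - i
--                 else:
--                     j = cycles[i]
--                     indices[i], indices[-j] = indices[-j], indices[i]
--                     yield tuple(pool[i] for i in indices[:r])
--                     break
--             else:
--                 return
--     result = []
--     for idx1, idx2 in combinations(range(len(s)),2):
--         swapped_s = list(s)
--         swapped_s[idx1], swapped_s[idx2] = swapped_s[idx2], swapped_s[idx1]
--         result.append((swapped_s))
--     return result
-- ===== SOURCE B (Python) =====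
-- def all_swap_combinations(s):
--     n = len(s)
--     result = []
--     for i in range(n):
--         for j in range(i + 1, n):
--             swapped = list(s)
--             swapped[i], swapped[j] = swapped[j], swapped[i]
--             result.append(swapped)
--     return result
-- ===== Notes on version B (the rewrite author's own statement) =====
-- stated objective: simpler
-- what changed: Replaced the hand-rolled permutation generator plus sortedness filter (which enumerates all n(n-1) ordered index pairs and discards half) by a direct double loop over index pairs i<j that builds each swapped copy immediately.
import Mathlib
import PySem

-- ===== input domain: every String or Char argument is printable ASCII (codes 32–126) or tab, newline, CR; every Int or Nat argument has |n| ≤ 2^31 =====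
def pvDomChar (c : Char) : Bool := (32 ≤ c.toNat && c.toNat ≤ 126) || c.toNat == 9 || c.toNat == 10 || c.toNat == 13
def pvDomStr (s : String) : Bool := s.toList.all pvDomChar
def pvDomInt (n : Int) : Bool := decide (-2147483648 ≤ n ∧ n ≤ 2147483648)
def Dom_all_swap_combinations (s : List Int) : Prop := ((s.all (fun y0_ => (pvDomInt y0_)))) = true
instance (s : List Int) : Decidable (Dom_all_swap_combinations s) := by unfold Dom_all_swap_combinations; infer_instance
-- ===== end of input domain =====

-- B replaces A's permutation-generator-plus-sortedness-filter machinery by a direct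
-- double loop over index pairs i < j (objective: simpler).

-- ===== PORT A =====
-- A's helper `all_permutations` is, verbatim, the documented pure-Python equivalent of
-- itertools.permutations; per PYSEM.md it is ported as the prelude primitive
-- PySem.List.permutations (exact: the same tuples in the same lexicographic-index order).
-- A's helper `combinations(iterable, r)` (used only with r = 2): filter the permutations
-- of the index range by `sorted(indices) == list(indices)` and read off `pool[i]`.
-- `pool[i]` is ported as `pool.getD i 0`: i ranges over range(len(pool)), so it is
-- always in range and Python never raises there.
def pyCombinations2 (pool : List Nat) : List (List Nat) :=
  ((PySem.List.permutations (List.range pool.length) 2).filter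
      (fun idx => PySem.List.sorted idx (fun x => x) false == idx)).map
    (fun idx => idx.map (fun i => pool.getD i 0))

-- the loop: for idx1, idx2 in combinations(range(len(s)), 2): copy s, swap, append.
-- `swapped_s[idx1], swapped_s[idx2] = swapped_s[idx2], swapped_s[idx1]` with in-range
-- indices is ported by getD/set (the RHS pair is read first, then the two assignments).
def all_swap_combinations (s : List Int) : List (List Int) :=
  (pyCombinations2 (List.range s.length)).foldl
    (fun result idx =>
      let idx1 := idx.getD 0 0
      let idx2 := idx.getD 1 0
      result ++ [(s.set idx1 (s.getD idx2 0)).set idx2 (s.getD idx1 0)])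
    []

-- ===== PORT B =====
-- Source B: for i in range(n): for j in range(i+1, n): append the i↔j-swapped copy of s.
-- range(n) / range(i+1, n) over these Nat bounds are exactly List.range n /
-- List.range' (i+1) (n-(i+1)); the in-range reads/writes are getD/set as in port A.
def all_swap_combinations_alt (s : List Int) : List (List Int) :=
  let n := s.length
  (List.range n).foldl
    (fun result i =>
      (List.range' (i + 1) (n - (i + 1))).foldl
        (fun result j =>
          result ++ [(s.set i (s.getD j 0)).set j (s.getD i 0)])
        result)
    []

-- ===== PRECONDITION & SPEC =====
def Spec_all_swap_combinations (s : List Int) (out : List (List Int)) : Prop := out = all_swap_combinations_alt s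
instance (s : List Int) (out : List (List Int)) : Decidable (Spec_all_swap_combinations s out) := by unfold Spec_all_swap_combinations; infer_instance

-- ===== CLAIM (what is proved, stated in full; the proofs are below) =====
def Claim_equal_all_swap_combinations : Prop := ∀ (s : List Int), Dom_all_swap_combinations s → Spec_all_swap_combinations s (all_swap_combinations s)

-- ===== LEMMAS AND PROOFS =====

-- one unfolding step of the permutations recursion
theorem perm_succ {α : Type} (xs : List α) (r : ℕ) : PySem.List.permutations xs (r+1) =
    (List.range xs.length).flatMap (fun i => match xs[i]? with
      | none => []
      | some x => (PySem.List.permutations (xs.eraseIdx i) r).map (x :: ·)) := by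
  rw [PySem.List.permutations]; rfl

theorem flatMap_congr_mem {α β : Type} {l : List α} {f g : α → List β}
    (h : ∀ a ∈ l, f a = g a) : l.flatMap f = l.flatMap g := by
  simp only [List.flatMap_def]; rw [List.map_congr_left h]

theorem map_getD_range {α : Type} (xs : List α) (d : α) :
    (List.range xs.length).map (fun i => xs.getD i d) = xs := by
  apply List.ext_getElem
  · simp
  · intro k h1 h2
    simp [List.getD_eq_getElem?_getD, List.getElem?_eq_getElem h2]

theorem flatten_map_singleton {α β : Type} (l : List α) (g : α → β) :
    (l.map (fun i => [g i])).flatten = l.map g := by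
  induction l with
  | nil => rfl
  | cons a t ih => simp [ih]

-- r = 1: the 1-permutations are the singletons, in order.
theorem perm_one {α : Type} [Inhabited α] (xs : List α) :
    PySem.List.permutations xs 1 = xs.map (fun x => [x]) := by
  rw [perm_succ]
  rw [flatMap_congr_mem (g := fun i => [[xs.getD i default]]) ?_]
  · have h2 : xs.map (fun x => [x]) = (List.range xs.length).map (fun i => [xs.getD i default]) := by
      conv_lhs => rw [← map_getD_range xs default]
      rw [List.map_map]; rfl
    rw [h2]
    simp [List.flatMap_def]
    exact flatten_map_singleton _ _
  · intro i hi
    rw [List.mem_range] at hi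
    rw [List.getElem?_eq_getElem hi]
    simp [PySem.List.permutations, List.getD_eq_getElem?_getD, List.getElem?_eq_getElem hi]

-- r = 2: first element picked by index, second from the remainder.
theorem perm_two {α : Type} [Inhabited α] (xs : List α) :
    PySem.List.permutations xs 2 =
      (List.range xs.length).flatMap
        (fun i => (xs.eraseIdx i).map (fun y => [xs.getD i default, y])) := by
  rw [perm_succ]
  apply flatMap_congr_mem
  intro i hi
  rw [List.mem_range] at hi
  rw [List.getElem?_eq_getElem hi]
  simp [perm_one, List.map_map, Function.comp_def,
    List.getD_eq_getElem?_getD, List.getElem?_eq_getElem hi]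

theorem drop_range (i n : ℕ) : (List.range n).drop i = List.range' i (n - i) := by
  apply List.ext_getElem
  · simp
  · intro k h1 h2
    simp

theorem range_eraseIdx (n i : ℕ) (hi : i < n) :
    (List.range n).eraseIdx i = List.range i ++ List.range' (i + 1) (n - (i + 1)) := by
  rw [List.eraseIdx_eq_take_drop_succ, List.take_range, drop_range]
  simp [Nat.min_eq_left hi.le]

-- `sorted([i, y]) == [i, y]` is exactly `i <= y`
theorem sorted_pair_beq (i y : ℕ) :
    (PySem.List.sorted [i, y] (fun x => x) false == [i, y]) = decide (i ≤ y) := by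
  by_cases h : i ≤ y
  · rw [PySem.List.sorted_eq_self_of_pairwise]
    · simp [h]
    · simp [h]
  · have hs : PySem.List.sorted [i, y] (fun x => x) false = [y, i] := by
      apply PySem.List.sorted_eq_of_perm_of_pairwise_lt
      · exact List.Perm.swap _ _ _
      · simp; omega
    rw [hs]
    have : y ≠ i := by omega
    simp [h, this]

theorem getD_range (n i : ℕ) (d : ℕ) (h : i < n) : (List.range n).getD i d = i := by
  simp [List.getD_eq_getElem?_getD, List.getElem?_range h]

-- A's filtered-permutation pairs are exactly the pairs [i, j] with i < j < n, in order.
theorem pairsA (n : ℕ) :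
    pyCombinations2 (List.range n) =
      (List.range n).flatMap
        (fun i => (List.range' (i + 1) (n - (i + 1))).map (fun j => [i, j])) := by
  unfold pyCombinations2
  rw [perm_two, List.filter_flatMap, List.map_flatMap]
  simp only [List.length_range]
  apply flatMap_congr_mem
  intro i hi
  rw [List.mem_range] at hi
  rw [getD_range n i default hi, range_eraseIdx n i hi, List.filter_map, List.map_map]
  have hcomp : ∀ y : ℕ,
      ((fun idx => PySem.List.sorted idx (fun x => x) false == idx) ∘ (fun y => [i, y])) y
        = decide (i ≤ y) := by
    intro y; exact sorted_pair_beq i y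
  rw [List.filter_congr (fun y _ => hcomp y), List.filter_append]
  have h1 : (List.range i).filter (fun y => decide (i ≤ y)) = [] := by
    rw [List.filter_eq_nil_iff]
    intro y hy
    rw [List.mem_range] at hy
    simp; omega
  have h2 : (List.range' (i+1) (n-(i+1))).filter (fun y => decide (i ≤ y)) = List.range' (i+1) (n-(i+1)) := by
    rw [List.filter_eq_self]
    intro y hy
    rw [List.mem_range'] at hy
    simp; omega
  rw [h1, h2, List.nil_append]
  apply List.map_congr_left
  intro j hj
  rw [List.mem_range'] at hj
  simp only [Function.comp_def, List.map_cons, List.map_nil]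
  rw [getD_range n i 0 hi, getD_range n j 0 (by omega)]

theorem ports_agree (s : List Int) : all_swap_combinations s = all_swap_combinations_alt s := by
  unfold all_swap_combinations all_swap_combinations_alt
  rw [pairsA]
  simp only [PySem.List.foldl_append_singleton_eq_map, PySem.List.foldl_append_eq_flatMap,
    List.nil_append, List.map_flatMap, List.map_map]
  apply flatMap_congr_mem
  intro i _
  apply List.map_congr_left
  intro j _
  simp

-- ===== VERDICT (by name: the statement is the Claim_ definition above) =====
theorem all_swap_combinations_spec : Claim_equal_all_swap_combinations := by
  intro s _
  unfold Spec_all_swap_combinations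
  exact ports_agree s
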